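-- pv_equiv track=rewrite | github.com/ldmckeen/ldm-tutorials | Companies/itonics_tech_test_ldmckeen/itonics_test_multiplier_divisor_count.py | countMultipleDivisors1
-- ===== SOURCE A (Python) =====
-- def countMultipleDivisors1(arr):
--
--     result_arr = [0 for i in range(len(arr))]
--
--     for i_index, i_num in enumerate(arr):
--         count = 0
--         for j_index, j_num in enumerate(arr):
--             if j_index == i_index:
--                 continue
--             elif j_num % i_num == 0 or i_num % j_num == 0:
--                 count += 1
--         result_arr[i_index] = count
--
--     return result_arr
-- ===== SOURCE B (Python) =====
-- def countMultipleDivisors1(arr):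
--     # NOTE: does pairwise divisibility work on DISTINCT absolute values only
--     # (divisibility of ints depends only on absolute values), then fans the
--     # answers back out over the list: O(n + d^2) for d distinct magnitudes.
--     mags = [abs(x) for x in arr]
--     cnt = {}
--     for a in mags:
--         cnt[a] = cnt.get(a, 0) + 1
--     res = {}
--     for a in cnt:
--         total = 0
--         for b in cnt:
--             if (a != 0 and b % a == 0) or (b != 0 and a % b == 0) or (a == 0 and b == 0):
--                 total += cnt[b]
--         res[a] = total - 1
--     return [res[a] for a in mags]
-- ===== Notes on version B (the rewrite author's own statement) =====
-- stated objective: alternative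
-- what changed: A scans all ordered pairs of positions; B builds a frequency map of the distinct absolute values once, does the pairwise divisibility work on distinct magnitudes only (O(n + d^2) for d distinct magnitudes), and fans the per-magnitude answers back out over the list.
import Mathlib
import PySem

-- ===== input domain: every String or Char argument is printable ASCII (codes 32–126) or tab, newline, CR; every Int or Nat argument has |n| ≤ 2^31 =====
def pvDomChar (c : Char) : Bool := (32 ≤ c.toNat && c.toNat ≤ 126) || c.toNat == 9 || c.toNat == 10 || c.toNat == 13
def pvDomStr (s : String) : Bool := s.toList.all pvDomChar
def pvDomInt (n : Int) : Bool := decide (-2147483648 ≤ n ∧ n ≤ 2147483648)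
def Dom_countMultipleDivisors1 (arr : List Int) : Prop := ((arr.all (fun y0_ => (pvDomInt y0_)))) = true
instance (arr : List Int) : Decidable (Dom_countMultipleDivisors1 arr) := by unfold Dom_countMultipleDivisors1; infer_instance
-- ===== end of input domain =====

-- B replaces A's all-pairs scan over positions by a frequency map over the DISTINCT
-- absolute values (int divisibility depends only on absolute values): pairwise work on
-- distinct magnitudes only, plus two linear passes.

-- ===== PORT A =====
def countMultipleDivisors1 (arr : List Int) : List Int :=
  let result0 : List Int := (List.range arr.length).map (fun _ => (0 : Int))
  (PySem.List.enumerate arr).foldl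
    (fun result_arr ip =>
      let count : Int := (PySem.List.enumerate arr).foldl
        (fun count jp =>
          if jp.1 == ip.1 then count
          else if PySem.Int.mod jp.2 ip.2 == 0 || PySem.Int.mod ip.2 jp.2 == 0 then count + 1
          else count) 0
      result_arr.set ip.1.toNat count)
    result0

-- ===== PORT B =====
-- Source B's divisibility test on two (nonnegative) magnitudes
def pvRel (a b : Int) : Bool :=
  (a != 0 && PySem.Int.mod b a == 0) || (b != 0 && PySem.Int.mod a b == 0) || (a == 0 && b == 0)

def countMultipleDivisors1_alt (arr : List Int) : List Int :=
  let mags := arr.map (fun x => |x|)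
  let cnt := mags.foldl (fun d a => d.insert a (d.getD a 0 + 1)) PySem.Dict.empty
  let res := cnt.keys.foldl
    (fun r a =>
      let total : Int := cnt.keys.foldl (fun t b => if pvRel a b then t + cnt.getD b 0 else t) 0
      r.insert a (total - 1)) PySem.Dict.empty
  mags.map (fun a => res.getD a 0)

-- ===== PRECONDITION & SPEC =====
-- Python A raises ZeroDivisionError whenever a 0 element meets another element
-- (j_num % 0 or 0 % 0); a singleton zero list is the only 0-containing input A
-- returns on, and Pre_ keeps it. Pre_ excludes exactly the raising inputs.
def Pre_countMultipleDivisors1 (arr : List Int) : Prop := (0 : Int) ∈ arr → arr = [0]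
instance (arr : List Int) : Decidable (Pre_countMultipleDivisors1 arr) := by unfold Pre_countMultipleDivisors1; infer_instance
def pvWitness_countMultipleDivisors1 : List Int := [2, -4, 3, 4]

def Spec_countMultipleDivisors1 (arr : List Int) (out : List Int) : Prop := out = countMultipleDivisors1_alt arr
instance (arr : List Int) (out : List Int) : Decidable (Spec_countMultipleDivisors1 arr out) := by unfold Spec_countMultipleDivisors1; infer_instance

-- ===== CLAIM (what is proved, stated in full; the proofs are below) =====
def Claim_equal_countMultipleDivisors1 : Prop := ∀ (arr : List Int), Dom_countMultipleDivisors1 arr → Pre_countMultipleDivisors1 arr → Spec_countMultipleDivisors1 arr (countMultipleDivisors1 arr)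

-- ===== LEMMAS AND PROOFS =====

-- A's raw pairwise test on the signed values; the value both programs count with
def pvP (x y : Int) : Bool := PySem.Int.mod y x == 0 || PySem.Int.mod x y == 0

-- the common per-position value: (# elements related to x by divisibility) - 1
def pvCount (arr : List Int) (x : Int) : Int := (arr.countP (pvP x) : Int) - 1

lemma pv_modz (a b : Int) : (PySem.Int.mod a b == 0) = decide (b ∣ a) := by
  rw [Bool.eq_iff_iff]; simp [PySem.Int.mod_eq_zero_iff_dvd]

lemma pvP_eq_dvd (x y : Int) : pvP x y = (decide (x ∣ y) || decide (y ∣ x)) := by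
  rw [pvP, pv_modz, pv_modz]

lemma pvRel_abs (x y : Int) : pvRel |x| |y| = pvP x y := by
  rw [pvP_eq_dvd, pvRel, pv_modz, pv_modz]
  by_cases hx : x = 0 <;> by_cases hy : y = 0 <;>
    first
    | (simp [hx, hy, abs_dvd, dvd_abs];
       have h1 : (|x| != 0) = true := by simp [abs_eq_zero, hx]
       have h2 : (|y| != 0) = true := by simp [abs_eq_zero, hy]
       have h3 : (|x| == 0) = false := by simp [abs_eq_zero, hx]
       simp [h1, h2, h3])
    | simp [hx, hy, dvd_abs, abs_eq_zero]

lemma pvP_self (x : Int) : pvP x x = true := by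
  simp [pvP_eq_dvd]

lemma pv_enum_count_ge (c : Int → Bool) (t : List Int) :
    ∀ (u s : Int), s < u →
      (PySem.List.enumerate t u).countP (fun jp => jp.1 != s && c jp.2) = t.countP c := by
  induction t with
  | nil => intro u s _; simp [PySem.List.enumerate_nil]
  | cons x tl ih =>
    intro u s h
    rw [PySem.List.enumerate_cons]
    simp only [List.countP_cons]
    rw [ih (u + 1) s (by omega)]
    have hne : ((u, x).1 != s) = true := by simp; omega
    simp [hne]

lemma pv_enum_count (c : Int → Bool) :
    ∀ (arr : List Int) (s : Int) (k : Nat) (hk : k < arr.length),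
      (PySem.List.enumerate arr s).countP (fun jp => jp.1 != (s + k) && c jp.2)
        + (if c (arr.getD k 0) then 1 else 0) = arr.countP c := by
  intro arr
  induction arr with
  | nil => intro s k hk; simp at hk
  | cons x tl ih =>
    intro s k hk
    rw [PySem.List.enumerate_cons]
    cases k with
    | zero =>
      simp only [Nat.cast_zero, add_zero, List.countP_cons, List.getD_cons_zero]
      rw [pv_enum_count_ge c tl (s + 1) s (by omega)]
      have hne : ((s, x).1 != s) = false := by simp
      simp only [hne, Bool.false_and]
      simp
    | succ n =>
      have h2 : (fun jp : Int × Int => jp.1 != (s + ((n + 1 : Nat) : Int)) && c jp.2)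
          = (fun jp : Int × Int => jp.1 != ((s + 1) + ((n : Nat) : Int)) && c jp.2) := by
        funext jp; congr 2; push_cast; ring
      have h1 : ((s, x).1 != ((s + 1) + ((n : Nat) : Int))) = true := by simp; omega
      rw [h2]
      simp only [List.countP_cons, h1, Bool.true_and, List.getD_cons_succ]
      have hIH := ih (s + 1) n (by simpa using Nat.lt_of_succ_lt_succ hk)
      omega

lemma pv_inner (arr : List Int) (k : Nat) (hk : k < arr.length) :
    ((PySem.List.enumerate arr).foldl
      (fun count jp =>
        if jp.1 == ((k : Int), arr.getD k 0).1 then count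
        else if PySem.Int.mod jp.2 (arr.getD k 0) == 0 || PySem.Int.mod (arr.getD k 0) jp.2 == 0 then count + 1
        else count) 0) = pvCount arr (arr.getD k 0) := by
  have hfun : (fun (count : Int) (jp : Int × Int) =>
        if jp.1 == ((k : Int), arr.getD k 0).1 then count
        else if PySem.Int.mod jp.2 (arr.getD k 0) == 0 || PySem.Int.mod (arr.getD k 0) jp.2 == 0 then count + 1
        else count)
      = (fun (count : Int) (jp : Int × Int) =>
        if (jp.1 != (k : Int) && pvP (arr.getD k 0) jp.2) then count + 1 else count) := by
    funext count jp
    by_cases h : jp.1 = (k : Int) <;> simp [h, pvP]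
  rw [hfun, PySem.List.foldl_if_add_one]
  have h := pv_enum_count (pvP (arr.getD k 0)) arr 0 k hk
  rw [pvP_self] at h
  simp only [if_true, zero_add] at h ⊢
  rw [pvCount]
  omega

lemma pv_foldl_set (g : Int → Int) :
    ∀ (l : List Int) (pre : List Int) (s : Nat), pre.length = s + l.length →
      (PySem.List.enumerate l (s : Int)).foldl (fun r ip => r.set ip.1.toNat (g ip.2)) pre
        = pre.take s ++ l.map g := by
  intro l
  induction l with
  | nil =>
    intro pre s h
    simp only [List.length_nil, Nat.add_zero] at h
    simp [PySem.List.enumerate_nil, List.take_of_length_le (Nat.le_of_eq h)]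
  | cons x tl ih =>
    intro pre s h
    rw [PySem.List.enumerate_cons]
    simp only [List.foldl_cons]
    have hcast : ((s : Int) + 1) = ((s + 1 : Nat) : Int) := by push_cast; ring
    have h' := h
    simp only [List.length_cons] at h'
    have hlen : (pre.set (s : Int).toNat (g x)).length = (s + 1) + tl.length := by
      simp only [List.length_set]; omega
    rw [hcast, ih _ (s + 1) hlen]
    have hs : (s : Int).toNat = s := by omega
    rw [hs]
    have hslt : s < pre.length := by omega

    have htake : (pre.set s (g x)).take (s + 1) = pre.take s ++ [g x] := by
      rw [List.set_eq_take_cons_drop (g x) hslt, List.take_append]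
      simp [List.length_take, Nat.min_eq_left (le_of_lt hslt), List.take_of_length_le]
    rw [htake]
    simp

lemma pv_A_eq_map (arr : List Int) :
    countMultipleDivisors1 arr = arr.map (pvCount arr) := by
  unfold countMultipleDivisors1
  have h0 : (List.range arr.length).map (fun _ => (0 : Int)) = List.replicate arr.length 0 := by
    simp [List.map_const']
  rw [h0]
  have hcongr := PySem.List.foldl_congr_mem
    (l := PySem.List.enumerate arr) (init := List.replicate arr.length (0 : Int))
    (f := fun result_arr ip =>
      result_arr.set ip.1.toNat
        ((PySem.List.enumerate arr).foldl
          (fun count jp =>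
            if jp.1 == ip.1 then count
            else if PySem.Int.mod jp.2 ip.2 == 0 || PySem.Int.mod ip.2 jp.2 == 0 then count + 1
            else count) 0))
    (g := fun result_arr ip => result_arr.set ip.1.toNat (pvCount arr ip.2))
    (by
      intro acc ip hip
      rw [PySem.List.mem_enumerate_iff] at hip
      obtain ⟨k, hk, hip⟩ := hip
      subst hip
      have hgd : arr.getD k 0 = arr[k] := List.getD_eq_getElem arr 0 hk
      have := pv_inner arr k hk
      rw [hgd] at this
      simp only [zero_add] at this ⊢
      rw [this])
  rw [hcongr]
  have := pv_foldl_set (pvCount arr) arr (List.replicate arr.length 0) 0 (by simp)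
  simpa using this

lemma pv_sum_count (mags : List Int) (p : Int → Bool) :
    (((PySem.Set.ofList mags).filter p).map (fun b => ((mags.count b : Nat) : Int))).sum
      = (mags.countP p : Int) := by
  have hperm : (PySem.Set.ofList mags).Perm mags.dedup := by
    rw [List.perm_ext_iff_of_nodup (PySem.Set.nodup_ofList mags) mags.nodup_dedup]
    intro a
    rw [PySem.Set.mem_ofList, List.mem_dedup]
  rw [((hperm.filter p).map (fun b => ((mags.count b : Nat) : Int))).sum_eq]
  rw [← List.sum_map_count_dedup_filter_eq_countP p mags, Nat.cast_list_sum, List.map_map]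
  rfl

lemma pv_B_eq_map (arr : List Int) :
    countMultipleDivisors1_alt arr = arr.map (pvCount arr) := by
  unfold countMultipleDivisors1_alt
  simp only []
  set mags := arr.map (fun x => |x|) with hmags
  rw [PySem.Dict.foldl_insert_getD_add_one_eq_counter mags]
  set cnt := PySem.Dict.counter mags with hc
  set T : Int → Int := fun a =>
    (cnt.keys.foldl (fun t b => if pvRel a b then t + cnt.getD b 0 else t) 0) - 1 with hT
  set res := cnt.keys.foldl
      (fun r a => r.insert a ((cnt.keys.foldl (fun t b => if pvRel a b then t + cnt.getD b 0 else t) 0) - 1))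
      PySem.Dict.empty with hr
  have hrT : res = cnt.keys.foldl (fun r a => r.insert a (T a)) PySem.Dict.empty := rfl
  have hres : res.items = cnt.keys.map (fun a => (a, T a)) := by
    have h1 : ∀ a ∈ cnt.keys, (PySem.Dict.empty : PySem.Dict Int Int).contains ((fun a => a) a) = false := by
      intro a _; exact PySem.Dict.contains_empty a
    have h2 : (cnt.keys.map (fun a => a)).Nodup := by
      rw [List.map_id']
      exact PySem.Dict.nodup_keys_counter mags
    rw [hrT]
    refine (PySem.Dict.items_foldl_insert_fresh cnt.keys (fun a => a) T PySem.Dict.empty h1 h2).trans ?_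
    simp [PySem.Dict.empty]
  have hreskeys : res.keys = cnt.keys := by
    show res.items.map (·.1) = cnt.keys
    rw [hres, List.map_map]
    exact (List.map_congr_left (fun a _ => rfl)).trans (List.map_id' _)
  have hgetD : ∀ a ∈ cnt.keys, res.getD a 0 = T a := by
    intro a ha
    apply PySem.Dict.getD_of_mem_items
    · rw [hres]; exact List.mem_map.2 ⟨a, ha, rfl⟩
    · rw [hreskeys]; exact PySem.Dict.nodup_keys_counter mags
  have hTval : ∀ a, T a = (mags.countP (pvRel a) : Int) - 1 := by
    intro a
    rw [hT]
    simp only []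
    rw [PySem.List.foldl_if_eq_foldl_filter (pvRel a) (fun t b => t + cnt.getD b 0)]
    rw [PySem.List.foldl_add _ (fun b => cnt.getD b 0)]
    have hmap : ((cnt.keys.filter (pvRel a)).map (fun b => cnt.getD b 0))
        = (((PySem.Set.ofList mags).filter (pvRel a)).map (fun b => ((mags.count b : Nat) : Int))) := by
      rw [hc, PySem.Dict.keys_counter mags]
      apply List.map_congr_left
      intro b _
      exact PySem.Dict.getD_counter mags b
    rw [hmap, pv_sum_count]
    ring
  have hmem : ∀ a ∈ mags, a ∈ cnt.keys := by
    intro a ha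
    rw [hc, PySem.Dict.keys_counter mags, PySem.Set.mem_ofList]
    exact ha
  have hmaps : mags.map (fun a => res.getD a 0) = mags.map (fun a => (mags.countP (pvRel a) : Int) - 1) := by
    apply List.map_congr_left
    intro a ha
    rw [hgetD a (hmem a ha), hTval a]
  rw [hmaps, hmags, List.map_map]
  apply List.map_congr_left
  intro x _
  simp only [Function.comp]
  have hcountP : (arr.map (fun x => |x|)).countP (pvRel |x|) = arr.countP (pvP x) := by
    rw [List.countP_map]
    apply List.countP_congr
    intro y _
    rw [Function.comp_apply, pvRel_abs x y]
  rw [hcountP]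
  rfl

-- ===== VERDICT (by name: the statement is the Claim_ definition above) =====
theorem countMultipleDivisors1_spec : Claim_equal_countMultipleDivisors1 := by
  intro arr _ _
  show countMultipleDivisors1 arr = countMultipleDivisors1_alt arr
  rw [pv_A_eq_map, pv_B_eq_map]
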